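-- pv_equiv track=rewrite | github.com/Suuuuuuuus/QUILT_sus | QUILT/Python/dump.py | recode_sequences
-- ===== SOURCE A (Python) =====
-- def recode_sequences(refseq, seq, bq, cigars_lst):
--     trim_start = 0
--     trim_end = 0
--
--     if cigars_lst[0][0] == 2:
--         trim_start = cigars_lst[0][1]
--         cigars_lst = cigars_lst[1:]
--     if cigars_lst[-1][0] == 2:
--         trim_end = cigars_lst[-1][1]
--         cigars_lst = cigars_lst[:-1]
--
--     refseq = refseq[trim_start:(len(refseq) - trim_end)]
--
--     newseq = ''
--     newrefseq = ''
--     newbq = ''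
--     refseq_index = 0
--     seq_index = 0
--     for code, length in cigars_lst:
--         if code == 1:
--             newrefseq += '.' * length
--             newseq += seq[seq_index:(seq_index + length)]
--             newbq += bq[seq_index:(seq_index + length)]
--             seq_index += length
--         elif code == 2:
--             newseq += '.' * length
--             newbq += 'f' * length
--             newrefseq += refseq[refseq_index:(refseq_index + length)]
--             refseq_index += length
--         else:
--             newseq += seq[seq_index:(seq_index + length)]
--             newbq += bq[seq_index:(seq_index + length)]
--             newrefseq += refseq[refseq_index:(refseq_index + length)]
--             seq_index += length
--             refseq_index += length
--     return newrefseq, newseq, newbq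
-- ===== SOURCE B (Python) =====
-- def recode_sequences(refseq, seq, bq, cigars_lst):
--     # identical trimming preamble
--     trim_start = 0
--     trim_end = 0
--     if cigars_lst[0][0] == 2:
--         trim_start = cigars_lst[0][1]
--         cigars_lst = cigars_lst[1:]
--     if cigars_lst[-1][0] == 2:
--         trim_end = cigars_lst[-1][1]
--         cigars_lst = cigars_lst[:-1]
--     refseq = refseq[trim_start:(len(refseq) - trim_end)]
--
--     # three independent single-index passes instead of one interleaved loop
--     newrefseq = ''
--     i = 0
--     for code, length in cigars_lst:
--         if code == 1:
--             newrefseq += '.' * length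
--         else:
--             newrefseq += refseq[i:i + length]
--             i += length
--
--     newseq = ''
--     i = 0
--     for code, length in cigars_lst:
--         if code == 2:
--             newseq += '.' * length
--         else:
--             newseq += seq[i:i + length]
--             i += length
--
--     newbq = ''
--     i = 0
--     for code, length in cigars_lst:
--         if code == 2:
--             newbq += 'f' * length
--         else:
--             newbq += bq[i:i + length]
--             i += length
--
--     return newrefseq, newseq, newbq
-- ===== Notes on version B (the rewrite author's own statement) =====
-- stated objective: alternative
-- what changed: Replaced the single interleaved loop maintaining five pieces of state (three output strings and two indices) by three independent single-index passes over the cigar list, one per output string.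
import Mathlib
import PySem

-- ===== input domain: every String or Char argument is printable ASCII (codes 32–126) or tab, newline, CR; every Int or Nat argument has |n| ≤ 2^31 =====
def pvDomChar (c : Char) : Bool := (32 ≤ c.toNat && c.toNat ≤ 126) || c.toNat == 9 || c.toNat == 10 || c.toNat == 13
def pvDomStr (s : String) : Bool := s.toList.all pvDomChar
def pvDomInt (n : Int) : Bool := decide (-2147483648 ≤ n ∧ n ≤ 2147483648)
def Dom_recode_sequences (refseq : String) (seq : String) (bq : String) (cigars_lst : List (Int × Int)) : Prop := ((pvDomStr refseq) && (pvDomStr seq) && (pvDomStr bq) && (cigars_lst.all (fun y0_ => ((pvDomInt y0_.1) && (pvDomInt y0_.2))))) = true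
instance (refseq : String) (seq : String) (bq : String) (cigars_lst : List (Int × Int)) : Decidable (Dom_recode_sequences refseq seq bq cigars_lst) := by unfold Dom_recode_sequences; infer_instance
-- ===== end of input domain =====

-- B replaces A's single interleaved five-state loop by three independent single-index
-- passes over the cigar list (objective: alternative decomposition, same cost).

-- Shared trimming preamble (identical lines in both Pythons): strip a leading/trailing
-- code-2 cigar, slice refseq accordingly; returns the trimmed refseq chars + cigar list.
def pvTrim (refseq : String) (cigars_lst : List (Int × Int)) : List Char × List (Int × Int) :=
  let (trim_start, cl1) :=
    match cigars_lst with
    | (c, l) :: rest => if c = 2 then (l, rest) else ((0 : Int), cigars_lst)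
    | [] => ((0 : Int), [])        -- unreachable: Pre_ excludes the empty list (IndexError)
  let (trim_end, cl2) :=
    match cl1.getLast? with
    | some (c, l) => if c = 2 then (l, cl1.dropLast) else ((0 : Int), cl1)
    | none => ((0 : Int), cl1)     -- Python raises here iff cl1 = [] with cigars_lst ≠ []; Pre_ excludes that
  (PySem.List.slice refseq.toList (some trim_start) (some ((refseq.toList.length : Int) - trim_end)), cl2)

-- ===== PORT A =====
-- A's interleaved loop body: state (newrefseq, newseq, newbq, refseq_index, seq_index)
def recAStep (rs sq qb : List Char) (st : List Char × List Char × List Char × Int × Int)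
    (c : Int × Int) : List Char × List Char × List Char × Int × Int :=
  match st, c with
  | (nrs, ns, nbq, ri, si), (code, len) =>
    if code = 1 then
      (nrs ++ List.replicate len.toNat '.',
       ns ++ PySem.List.slice sq (some si) (some (si + len)),
       nbq ++ PySem.List.slice qb (some si) (some (si + len)),
       ri, si + len)
    else if code = 2 then
      (nrs ++ PySem.List.slice rs (some ri) (some (ri + len)),
       ns ++ List.replicate len.toNat '.',
       nbq ++ List.replicate len.toNat 'f',
       ri + len, si)
    else
      (nrs ++ PySem.List.slice rs (some ri) (some (ri + len)),
       ns ++ PySem.List.slice sq (some si) (some (si + len)),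
       nbq ++ PySem.List.slice qb (some si) (some (si + len)),
       ri + len, si + len)

def recode_sequences (refseq : String) (seq : String) (bq : String) (cigars_lst : List (Int × Int)) : String × String × String :=
  let (rs, cl) := pvTrim refseq cigars_lst
  let st := cl.foldl (recAStep rs seq.toList bq.toList) ([], [], [], 0, 0)
  (String.ofList st.1, String.ofList st.2.1, String.ofList st.2.2.1)

-- ===== PORT B =====
-- B's three passes, each a fold with its own (accumulated string, index) state.
def recRefStep (rs : List Char) (st : List Char × Int) (c : Int × Int) : List Char × Int :=
  if c.1 = 1 then (st.1 ++ List.replicate c.2.toNat '.', st.2)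
  else (st.1 ++ PySem.List.slice rs (some st.2) (some (st.2 + c.2)), st.2 + c.2)

def recSeqStep (sq : List Char) (st : List Char × Int) (c : Int × Int) : List Char × Int :=
  if c.1 = 2 then (st.1 ++ List.replicate c.2.toNat '.', st.2)
  else (st.1 ++ PySem.List.slice sq (some st.2) (some (st.2 + c.2)), st.2 + c.2)

def recBqStep (qb : List Char) (st : List Char × Int) (c : Int × Int) : List Char × Int :=
  if c.1 = 2 then (st.1 ++ List.replicate c.2.toNat 'f', st.2)
  else (st.1 ++ PySem.List.slice qb (some st.2) (some (st.2 + c.2)), st.2 + c.2)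

def recode_sequences_alt (refseq : String) (seq : String) (bq : String) (cigars_lst : List (Int × Int)) : String × String × String :=
  let (rs, cl) := pvTrim refseq cigars_lst
  (String.ofList (cl.foldl (recRefStep rs) ([], 0)).1,
   String.ofList (cl.foldl (recSeqStep seq.toList) ([], 0)).1,
   String.ofList (cl.foldl (recBqStep bq.toList) ([], 0)).1)

-- ===== PRECONDITION & SPEC =====
-- Pre_ excludes exactly the inputs where Python A raises IndexError: the empty cigar
-- list, and a single cigar with code 2 (the list is empty after the first trim, so
-- cigars_lst[-1] raises).  B raises identically there (same preamble).
def Pre_recode_sequences (refseq : String) (seq : String) (bq : String) (cigars_lst : List (Int × Int)) : Prop :=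
  cigars_lst ≠ [] ∧ ¬(cigars_lst.length = 1 ∧ cigars_lst.headI.1 = 2)
instance (refseq : String) (seq : String) (bq : String) (cigars_lst : List (Int × Int)) : Decidable (Pre_recode_sequences refseq seq bq cigars_lst) := by unfold Pre_recode_sequences; infer_instance

def pvWitness_recode_sequences : String × String × String × (List (Int × Int)) :=
  ("abcde", "xy", "qr", [(2, 1), (0, 2), (1, 1), (2, 2)])

def Spec_recode_sequences (refseq : String) (seq : String) (bq : String) (cigars_lst : List (Int × Int)) (out : String × String × String) : Prop := out = recode_sequences_alt refseq seq bq cigars_lst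
instance (refseq : String) (seq : String) (bq : String) (cigars_lst : List (Int × Int)) (out : String × String × String) : Decidable (Spec_recode_sequences refseq seq bq cigars_lst out) := by unfold Spec_recode_sequences; infer_instance

-- ===== CLAIM (what is proved, stated in full; the proofs are below) =====
def Claim_equal_recode_sequences : Prop := ∀ (refseq : String) (seq : String) (bq : String) (cigars_lst : List (Int × Int)), Dom_recode_sequences refseq seq bq cigars_lst → Pre_recode_sequences refseq seq bq cigars_lst → Spec_recode_sequences refseq seq bq cigars_lst (recode_sequences refseq seq bq cigars_lst)

-- ===== LEMMAS AND PROOFS =====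
-- A's interleaved fold equals the triple of B's independent folds (with matching indices).
lemma fold_split (rs sq qb : List Char) :
    ∀ (cl : List (Int × Int)) (nrs ns nbq : List Char) (ri si : Int),
      cl.foldl (recAStep rs sq qb) (nrs, ns, nbq, ri, si) =
        ((cl.foldl (recRefStep rs) (nrs, ri)).1,
         (cl.foldl (recSeqStep sq) (ns, si)).1,
         (cl.foldl (recBqStep qb) (nbq, si)).1,
         (cl.foldl (recRefStep rs) (nrs, ri)).2,
         (cl.foldl (recSeqStep sq) (ns, si)).2) := by
  intro cl
  induction cl with
  | nil => intro nrs ns nbq ri si; rfl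
  | cons c t ih =>
    intro nrs ns nbq ri si
    obtain ⟨code, len⟩ := c
    by_cases h1 : code = 1
    · simp [List.foldl_cons, recAStep, recRefStep, recSeqStep, recBqStep, h1, ih]
    · by_cases h2 : code = 2
      · simp [List.foldl_cons, recAStep, recRefStep, recSeqStep, recBqStep, h2, ih]
      · simp [List.foldl_cons, recAStep, recRefStep, recSeqStep, recBqStep, h1, h2, ih]

-- ===== VERDICT (by name: the statement is the Claim_ definition above) =====
theorem recode_sequences_spec : Claim_equal_recode_sequences := by
  intro refseq seq bq cigars_lst _ _
  show _ = _
  unfold recode_sequences recode_sequences_alt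
  obtain ⟨rs, cl⟩ := pvTrim refseq cigars_lst
  simp only [fold_split]
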